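-- pv_equiv track=rewrite | github.com/Pandujatip/PLIRM34-WEB-APLIKASI | server.py | parse_carbon_brush_equipment_code
-- ===== SOURCE A (Python) =====
-- def parse_carbon_brush_equipment_code(equipment_name: str) -> str:
--     text = str(equipment_name or "").strip()
--     code = ""
--     for char in text:
--         if not code and not char.isdigit():
--             continue
--         if char.isalnum() or char == "-":
--             code += char
--             continue
--         break
--     return code[:32]
-- ===== SOURCE B (Python) =====
-- def parse_carbon_brush_equipment_code(equipment_name: str) -> str:
--     text = str(equipment_name or "").strip()
--     # tokenize the text into maximal runs of code characters (alnum or '-')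
--     runs = []
--     cur = ""
--     for c in text:
--         if c.isalnum() or c == "-":
--             cur += c
--         else:
--             if cur:
--                 runs.append(cur)
--             cur = ""
--     if cur:
--         runs.append(cur)
--     # the code is the first digit-containing run, cut at its first digit
--     for run in runs:
--         for i, c in enumerate(run):
--             if c.isdigit():
--                 return run[i:][:32]
--     return ""
-- ===== Notes on version B (the rewrite author's own statement) =====
-- stated objective: alternative
-- what changed: Replaces A's single stateful scan (phase encoded by the accumulator's emptiness, with continue/break) by a tokenizer that first splits the text into maximal runs of alphanumeric-or-dash characters and then returns the first digit-containing run cut at its first digit.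
import Mathlib
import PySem

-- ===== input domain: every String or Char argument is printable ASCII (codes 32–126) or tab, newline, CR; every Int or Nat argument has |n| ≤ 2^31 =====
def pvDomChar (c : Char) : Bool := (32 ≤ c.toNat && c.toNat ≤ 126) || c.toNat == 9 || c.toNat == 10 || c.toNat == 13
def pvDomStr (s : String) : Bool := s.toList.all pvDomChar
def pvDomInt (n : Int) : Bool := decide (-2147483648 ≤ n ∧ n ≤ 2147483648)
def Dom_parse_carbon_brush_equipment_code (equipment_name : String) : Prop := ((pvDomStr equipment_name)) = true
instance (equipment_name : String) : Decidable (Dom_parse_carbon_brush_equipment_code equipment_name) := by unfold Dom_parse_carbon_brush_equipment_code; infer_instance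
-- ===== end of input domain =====

-- B replaces A's single stateful scan by a tokenizer: split the text into maximal runs of
-- alphanumeric-or-dash characters, then return the first digit-containing run cut at its first digit;
-- objective: alternative (same cost, different algorithm).


-- ===== PORT A =====
-- the 'for char in text' loop: state is the accumulated code; 'break' returns the state
def pvLoopA : List Char → List Char → List Char
  | [], code => code
  | c :: rest, code =>
    if code.isEmpty && !(PySem.Chars.isdigit c) then pvLoopA rest code
    else if PySem.Chars.isalnum c || c == '-' then pvLoopA rest (code ++ [c])
    else code

def parse_carbon_brush_equipment_code (equipment_name : String) : String :=
  let text := PySem.Chars.strip equipment_name.toList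
  let code := pvLoopA text []
  String.mk (PySem.List.slice code none (some 32))

-- ===== PORT B =====
-- tokenizer loop: state is the current run 'cur'; emits each maximal run of alnum/'-' chars
def pvRuns : List Char → List Char → List (List Char)
  | [], cur => if cur.isEmpty then [] else [cur]
  | c :: rest, cur =>
    if PySem.Chars.isalnum c || c == '-' then pvRuns rest (cur ++ [c])
    else if cur.isEmpty then pvRuns rest []
    else cur :: pvRuns rest []

-- inner 'for i, c in enumerate(run)' loop: first digit -> run[i:] (returned as c :: rest)
def pvFirstDigitSuffix : List Char → Option (List Char)
  | [] => none
  | c :: rest => if PySem.Chars.isdigit c then some (c :: rest) else pvFirstDigitSuffix rest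

-- outer 'for run in runs' loop
def pvSearch : List (List Char) → Option (List Char)
  | [] => none
  | r :: rs =>
    match pvFirstDigitSuffix r with
    | some s => some s
    | none => pvSearch rs

def parse_carbon_brush_equipment_code_alt (equipment_name : String) : String :=
  let text := PySem.Chars.strip equipment_name.toList
  let runs := pvRuns text []
  match pvSearch runs with
  | some suf => String.mk (PySem.List.slice suf none (some 32))
  | none => ""

-- ===== PRECONDITION & SPEC =====
def Spec_parse_carbon_brush_equipment_code (equipment_name : String) (out : String) : Prop := out = parse_carbon_brush_equipment_code_alt equipment_name
instance (equipment_name : String) (out : String) : Decidable (Spec_parse_carbon_brush_equipment_code equipment_name out) := by unfold Spec_parse_carbon_brush_equipment_code; infer_instance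

-- ===== CLAIM (what is proved, stated in full; the proofs are below) =====
def Claim_equal_parse_carbon_brush_equipment_code : Prop := ∀ (equipment_name : String), Dom_parse_carbon_brush_equipment_code equipment_name → Spec_parse_carbon_brush_equipment_code equipment_name (parse_carbon_brush_equipment_code equipment_name)

-- ===== LEMMAS AND PROOFS =====
-- proof-side bridges: suffix of cs from its first digit ([] if none), leading run of code chars
def pvDropToDigit : List Char → List Char
  | [] => []
  | c :: rest => if !(PySem.Chars.isdigit c) then pvDropToDigit rest else c :: rest

def pvTakeCode : List Char → List Char
  | [] => []
  | c :: rest =>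
    if !(PySem.Chars.isalnum c || c == '-') then []
    else c :: pvTakeCode rest

-- A's characterisation -------------------------------------------------------
theorem pvLoopA_nonempty (cs : List Char) (code : List Char) (h : code ≠ []) :
    pvLoopA cs code = code ++ pvTakeCode cs := by
  induction cs generalizing code with
  | nil => simp [pvLoopA, pvTakeCode]
  | cons c rest ih =>
    have hcond : (code.isEmpty && !(PySem.Chars.isdigit c)) = false := by
      simp [List.isEmpty_iff, h]
    simp only [pvLoopA, pvTakeCode, hcond, Bool.false_eq_true, if_false]
    by_cases hc : (PySem.Chars.isalnum c || c == '-') = true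
    · simp [hc, ih (code ++ [c]) (by simp)]
    · simp [hc]

theorem pvLoopA_eq (cs : List Char) :
    pvLoopA cs [] = pvTakeCode (pvDropToDigit cs) := by
  induction cs with
  | nil => rfl
  | cons c rest ih =>
    by_cases hd : PySem.Chars.isdigit c = true
    · have halnum : PySem.Chars.isalnum c = true := by
        simp [PySem.Chars.isalnum, hd]
      simp only [pvLoopA, pvDropToDigit, hd]
      simp [pvLoopA_nonempty rest [c] (by simp), pvTakeCode, halnum]
    · simp only [pvLoopA, pvDropToDigit, hd, List.isEmpty_nil]
      simpa using ih

-- digits are alnum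
theorem pv_digit_code (c : Char) (h : PySem.Chars.isdigit c = true) :
    (PySem.Chars.isalnum c || c == '-') = true := by
  simp [PySem.Chars.isalnum, h]

-- pvFirstDigitSuffix characterised by any/dropToDigit
theorem pvFirstDigitSuffix_eq (r : List Char) :
    pvFirstDigitSuffix r =
      if r.any PySem.Chars.isdigit then some (pvDropToDigit r) else none := by
  induction r with
  | nil => rfl
  | cons c rest ih =>
    by_cases hd : PySem.Chars.isdigit c = true
    · simp [pvFirstDigitSuffix, pvDropToDigit, hd]
    · simp [pvFirstDigitSuffix, pvDropToDigit, hd, ih]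

theorem pvDropToDigit_append (cur : List Char) (c : Char)
    (h : cur.any PySem.Chars.isdigit = true) :
    pvDropToDigit (cur ++ [c]) = pvDropToDigit cur ++ [c] := by
  induction cur with
  | nil => simp at h
  | cons a rest ih =>
    by_cases ha : PySem.Chars.isdigit a = true
    · simp [pvDropToDigit, ha]
    · simp only [List.any_cons, ha, Bool.false_or] at h
      simp [pvDropToDigit, ha, ih h]

theorem pvDropToDigit_none (cs : List Char) (h : cs.any PySem.Chars.isdigit = false) :
    pvDropToDigit cs = [] := by
  induction cs with
  | nil => rfl
  | cons c rest ih =>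
    simp only [List.any_cons, Bool.or_eq_false_iff] at h
    simp [pvDropToDigit, h.1, ih h.2]

-- B's search over runs, with a digit already in the open run
theorem pvSearch_runs_digit (cs : List Char) (cur : List Char)
    (h : cur.any PySem.Chars.isdigit = true) :
    pvSearch (pvRuns cs cur) = some (pvDropToDigit cur ++ pvTakeCode cs) := by
  induction cs generalizing cur with
  | nil =>
    have hne : cur.isEmpty = false := by
      cases cur with
      | nil => simp at h
      | cons a l => rfl
    simp [pvRuns, hne, pvSearch, pvFirstDigitSuffix_eq, h, pvTakeCode]
  | cons c rest ih =>
    by_cases hc : (PySem.Chars.isalnum c || c == '-') = true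
    · have hcur : (cur ++ [c]).any PySem.Chars.isdigit = true := by
        simp [List.any_append, h]
      simp only [pvRuns, hc, if_true, ih _ hcur, pvTakeCode,
        pvDropToDigit_append cur c h]
      simp
    · have hne : cur.isEmpty = false := by
        cases cur with
        | nil => simp at h
        | cons a l => rfl
      simp [pvRuns, hc, hne, pvSearch, pvFirstDigitSuffix_eq, h, pvTakeCode]

-- B's search over runs, no digit yet in the open run
theorem pvSearch_runs_nodigit (cs : List Char) (cur : List Char)
    (h : cur.any PySem.Chars.isdigit = false) :
    pvSearch (pvRuns cs cur) =
      if cs.any PySem.Chars.isdigit then some (pvTakeCode (pvDropToDigit cs)) else none := by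
  induction cs generalizing cur with
  | nil =>
    by_cases hne : cur.isEmpty = true
    · simp [pvRuns, hne, pvSearch]
    · simp [pvRuns, hne, pvSearch, pvFirstDigitSuffix_eq, h]
  | cons c rest ih =>
    by_cases hd : PySem.Chars.isdigit c = true
    · have hc := pv_digit_code c hd
      have hcur : (cur ++ [c]).any PySem.Chars.isdigit = true := by
        simp [List.any_append, hd]
      have h1 : pvDropToDigit (cur ++ [c]) = [c] := by
        have : pvDropToDigit (cur ++ [c]) = pvDropToDigit [c] := by
          clear hcur
          induction cur with
          | nil => rfl
          | cons a l ihc =>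
            simp only [List.any_cons, Bool.or_eq_false_iff] at h
            simp [pvDropToDigit, h.1, ihc h.2]
        simp [this, pvDropToDigit, hd]
      simp only [pvRuns, hc, if_true, pvSearch_runs_digit rest _ hcur, h1,
        List.any_cons, hd, Bool.true_or, if_true]
      simp [pvDropToDigit, pvTakeCode, hd, hc]
    · by_cases hc : (PySem.Chars.isalnum c || c == '-') = true
      · have hcur : (cur ++ [c]).any PySem.Chars.isdigit = false := by
          simp [List.any_append, h, hd]
        simp only [pvRuns, hc, if_true, ih _ hcur]
        simp [pvDropToDigit, hd]
      · have hrec : pvSearch (pvRuns rest []) =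
            if rest.any PySem.Chars.isdigit then some (pvTakeCode (pvDropToDigit rest)) else none :=
          ih [] rfl
        have hgoal : pvSearch (pvRuns (c :: rest) cur) = pvSearch (pvRuns rest []) := by
          by_cases hne : cur.isEmpty = true
          · simp [pvRuns, hc, hne]
          · simp [pvRuns, hc, hne, pvSearch, pvFirstDigitSuffix_eq, h]
        rw [hgoal, hrec]
        simp [pvDropToDigit, hd]

-- ===== VERDICT (by name: the statement is the Claim_ definition above) =====
theorem parse_carbon_brush_equipment_code_spec : Claim_equal_parse_carbon_brush_equipment_code := by
  intro s _
  unfold Spec_parse_carbon_brush_equipment_code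
  simp only [parse_carbon_brush_equipment_code, parse_carbon_brush_equipment_code_alt, pvLoopA_eq]
  rw [pvSearch_runs_nodigit _ [] rfl]
  by_cases hany : (PySem.Chars.strip s.toList).any PySem.Chars.isdigit = true
  · simp [hany]
  · simp only [Bool.not_eq_true] at hany
    rw [pvDropToDigit_none _ hany]
    simp [hany, pvTakeCode, PySem.List.slice]
    rfl
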